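-- pv_equiv track=rewrite | github.com/HaderCabrera/html_css_python | Estructura de datos/diccionarios/matrices/ejercicioOne.py | calcProdMaxIngresosSem
-- ===== SOURCE A (Python) =====
-- def calcProdMaxIngresosSem(matVtas, matPrecios):
--     fil = len(matVtas)
--     lstTotVtas = [0]*fil
--     for f in range(fil):
--         lstTotVtas[f] = sum(matVtas[f]) * matPrecios[f]
--     maxVtas = max(lstTotVtas)
--     prodMaxVtas = lstTotVtas.index(maxVtas) + 1
--     return prodMaxVtas
-- ===== SOURCE B (Python) =====
-- def calcProdMaxIngresosSem(matVtas, matPrecios):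
--     best_rev = None
--     best_idx = -1
--     for f, fila in enumerate(matVtas):
--         rev = sum(fila) * matPrecios[f]
--         if best_rev is None or rev > best_rev:
--             best_rev = rev
--             best_idx = f
--     return best_idx + 1
-- ===== Notes on version B (the rewrite author's own statement) =====
-- stated objective: simpler
-- what changed: Replaces A's three-pass pipeline (build the full list of totals, max() over it, list.index() to find the first maximum) with a single running strict-max loop that keeps only best_rev/best_idx and never materialises the list.
import Mathlib
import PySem

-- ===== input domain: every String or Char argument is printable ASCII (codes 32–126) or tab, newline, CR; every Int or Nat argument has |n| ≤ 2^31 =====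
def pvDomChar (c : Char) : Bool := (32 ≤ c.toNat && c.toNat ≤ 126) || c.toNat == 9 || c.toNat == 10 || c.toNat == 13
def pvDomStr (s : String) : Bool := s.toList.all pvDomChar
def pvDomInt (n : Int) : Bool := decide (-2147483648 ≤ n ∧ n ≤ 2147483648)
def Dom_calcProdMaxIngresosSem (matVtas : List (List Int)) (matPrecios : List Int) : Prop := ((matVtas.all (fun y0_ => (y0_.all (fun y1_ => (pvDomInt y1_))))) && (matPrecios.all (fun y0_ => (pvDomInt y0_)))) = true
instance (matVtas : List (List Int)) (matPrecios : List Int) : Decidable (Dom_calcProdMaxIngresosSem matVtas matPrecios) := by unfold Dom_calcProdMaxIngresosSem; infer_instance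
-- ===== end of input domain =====

-- B replaces A's build-full-list + max() + list.index() pipeline by a single running
-- strict-max pass that never materialises the list of totals (objective: simpler).

-- ===== PORT A =====
def calcProdMaxIngresosSem (matVtas : List (List Int)) (matPrecios : List Int) : Int :=
  let fil : Int := matVtas.length
  let lstTotVtas : List Int :=
    (PySem.List.pyRange 0 fil 1).map
      (fun f => (((PySem.List.pyGet? matVtas f).getD []).sum) * ((PySem.List.pyGet? matPrecios f).getD 0))
  let maxVtas : Int := (PySem.List.max? lstTotVtas (fun y => y)).getD 0
  let prodMaxVtas : Int := (((PySem.List.index? lstTotVtas maxVtas).getD 0 : Nat) : Int) + 1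
  prodMaxVtas

-- ===== PORT B =====
-- the 'for f, fila in enumerate(matVtas)' loop of Source B, state = (best_rev, best_idx)
def pvAltLoop (matPrecios : List Int) : List (List Int) → Nat → Option Int → Int → Int
  | [], _, _, bestIdx => bestIdx + 1
  | fila :: rest, f, bestRev, bestIdx =>
    let rev : Int := fila.sum * ((PySem.List.pyGet? matPrecios (f : Int)).getD 0)
    match bestRev with
    | none => pvAltLoop matPrecios rest (f + 1) (some rev) (f : Int)
    | some b =>
      if b < rev then pvAltLoop matPrecios rest (f + 1) (some rev) (f : Int)
      else pvAltLoop matPrecios rest (f + 1) (some b) bestIdx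

def calcProdMaxIngresosSem_alt (matVtas : List (List Int)) (matPrecios : List Int) : Int :=
  pvAltLoop matPrecios matVtas 0 none (-1)

-- ===== PRECONDITION & SPEC =====
-- Pre_ excludes exactly the inputs where Python A raises: max([]) raises ValueError on an
-- empty matrix, and matPrecios[f] raises IndexError when matPrecios is shorter than matVtas.
def Pre_calcProdMaxIngresosSem (matVtas : List (List Int)) (matPrecios : List Int) : Prop :=
  matVtas ≠ [] ∧ matVtas.length ≤ matPrecios.length
instance (matVtas : List (List Int)) (matPrecios : List Int) : Decidable (Pre_calcProdMaxIngresosSem matVtas matPrecios) := by unfold Pre_calcProdMaxIngresosSem; infer_instance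

def pvWitness_calcProdMaxIngresosSem : List (List Int) × List Int := ([[1, 2], [3]], [5, 10])

def Spec_calcProdMaxIngresosSem (matVtas : List (List Int)) (matPrecios : List Int) (out : Int) : Prop := out = calcProdMaxIngresosSem_alt matVtas matPrecios
instance (matVtas : List (List Int)) (matPrecios : List Int) (out : Int) : Decidable (Spec_calcProdMaxIngresosSem matVtas matPrecios out) := by unfold Spec_calcProdMaxIngresosSem; infer_instance

-- ===== CLAIM (what is proved, stated in full; the proofs are below) =====
def Claim_equal_calcProdMaxIngresosSem : Prop := ∀ (matVtas : List (List Int)) (matPrecios : List Int), Dom_calcProdMaxIngresosSem matVtas matPrecios → Pre_calcProdMaxIngresosSem matVtas matPrecios → Spec_calcProdMaxIngresosSem matVtas matPrecios (calcProdMaxIngresosSem matVtas matPrecios)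

-- ===== LEMMAS AND PROOFS =====

-- value-level view of B's loop: same recursion over the list of weekly revenues
def pvLoopL : List Int → Nat → Option Int → Int → Int
  | [], _, _, bestIdx => bestIdx + 1
  | x :: xs, f, bestRev, bestIdx =>
    match bestRev with
    | none => pvLoopL xs (f + 1) (some x) (f : Int)
    | some b =>
      if b < x then pvLoopL xs (f + 1) (some x) (f : Int)
      else pvLoopL xs (f + 1) (some b) bestIdx

-- the list of revenues row f onward
def pvRevs (matPrecios : List Int) : List (List Int) → Nat → List Int
  | [], _ => []
  | r :: rs, f => (r.sum * ((PySem.List.pyGet? matPrecios (f : Int)).getD 0)) :: pvRevs matPrecios rs (f + 1)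

theorem pvAltLoop_eq_loopL (p : List Int) (rows : List (List Int)) :
    ∀ (f : Nat) (best : Option Int) (bi : Int),
      pvAltLoop p rows f best bi = pvLoopL (pvRevs p rows f) f best bi := by
  induction rows with
  | nil => intro f best bi; rfl
  | cons r rs ih =>
    intro f best bi
    simp only [pvAltLoop, pvRevs, pvLoopL]
    cases best with
    | none => exact ih (f + 1) _ _
    | some b =>
      by_cases h : b < r.sum * ((PySem.List.pyGet? p (f : Int)).getD 0) <;> simp [ih]

theorem pvLst_eq_revs (p : List Int) :
    ∀ (suf pre : List (List Int)),
      (PySem.List.pyRange (pre.length : Int) ((pre.length : Int) + (suf.length : Int)) 1).map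
        (fun f => (((PySem.List.pyGet? (pre ++ suf) f).getD []).sum) * ((PySem.List.pyGet? p f).getD 0))
      = pvRevs p suf pre.length := by
  intro suf
  induction suf with
  | nil =>
    intro pre
    rw [PySem.List.pyRange_one_eq_nil (by simp)]
    rfl
  | cons r rs ih =>
    intro pre
    rw [PySem.List.pyRange_one_cons (by push_cast [List.length_cons]; omega)]
    have hhead := PySem.List.pyGet?_append_length (pre := pre) (y := r) (ys := rs)
    have h2 : pre ++ r :: rs = (pre ++ [r]) ++ rs := by simp
    simp only [List.map_cons, hhead, Option.getD_some, pvRevs]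
    refine congrArg (fun t => _ :: t) ?_
    have ha : ((pre.length : Int) + 1) = (((pre ++ [r]).length : Nat) : Int) := by
      simp
    have hb : ((pre.length : Int) + ((r :: rs).length : Int)) =
        (((pre ++ [r]).length : Nat) : Int) + ((rs.length : Int)) := by
      simp; omega
    rw [h2, ha, hb, ih (pre ++ [r])]
    have : (pre ++ [r]).length = pre.length + 1 := by simp
    rw [this]

-- foldl max splits off its seed
theorem pvFoldlMax (l : List Int) : ∀ (a b : Int), l.foldl max (max a b) = max a (l.foldl max b) := by
  induction l with
  | nil => intro a b; rfl
  | cons c cs ih =>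
    intro a b
    simp only [List.foldl_cons, max_assoc]
    exact ih a (max b c)

-- the running strict-max loop, started with a current best m, yields the index (+1)
-- of the first maximum of the whole list iff that maximum beats m
theorem pvLoopL_some (l : List Int) :
    ∀ (f : Nat) (m bi : Int),
      pvLoopL l f (some m) bi =
        (PySem.List.max? l (fun y => y)).elim (bi + 1)
          (fun M => if m < M then (f : Int) + (((PySem.List.index? l M).getD 0 : Nat) : Int) + 1 else bi + 1) := by
  induction l with
  | nil => intro f m bi; rfl
  | cons x xs ih =>
    intro f m bi
    rw [PySem.List.max?_id_cons]
    simp only [pvLoopL]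
    cases xs with
    | nil =>
      by_cases hmx : m < x <;>
        simp [hmx, ih, PySem.List.max?]
    | cons y ys =>
      have hfold : (y :: ys).foldl max x = max x (ys.foldl max y) := by
        simpa using pvFoldlMax ys x y
      have hMx : PySem.List.max? (y :: ys) (fun v => v) = some (ys.foldl max y) :=
        PySem.List.max?_id_cons y ys
      have hmem : (ys.foldl max y) ∈ (y :: ys) := PySem.List.max?_mem hMx
      obtain ⟨k, hk⟩ : ∃ k, PySem.List.index? (y :: ys) (ys.foldl max y) = some k := by
        rw [Option.isSome_iff_exists.symm, PySem.List.index?_isSome_iff]; exact hmem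
      rw [hfold]
      by_cases hmx : m < x
      · rw [if_pos hmx, ih, hMx]
        simp only [Option.elim_some]
        by_cases hx : x < ys.foldl max y
        · have hne : x ≠ ys.foldl max y := ne_of_lt hx
          rw [if_pos hx, if_pos (lt_of_lt_of_le hmx (le_max_left _ _)),
            max_eq_right (le_of_lt hx), PySem.List.index?_cons_of_ne _ hne, hk]
          simp only [Option.map_some, Option.getD_some]
          push_cast; ring
        · rw [if_neg hx, max_eq_left (not_lt.mp hx),
            if_pos hmx, PySem.List.index?_cons_self]
          simp
      · rw [if_neg hmx, ih, hMx]
        simp only [Option.elim_some]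
        have hxm : x ≤ m := not_lt.mp hmx
        by_cases hm2 : m < ys.foldl max y
        · have hx : x < ys.foldl max y := lt_of_le_of_lt hxm hm2
          have hne : x ≠ ys.foldl max y := ne_of_lt hx
          rw [if_pos hm2, if_pos (lt_of_lt_of_le hm2 (le_max_right _ _)),
            max_eq_right (le_of_lt hx), PySem.List.index?_cons_of_ne _ hne, hk]
          simp only [Option.map_some, Option.getD_some]
          push_cast; ring
        · rw [if_neg hm2, if_neg (by simp; omega)]

-- one update step from the initial state lands on the first-max index of the whole list
theorem pvStep (x : Int) (xs : List Int) (f : Nat) :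
    pvLoopL xs (f + 1) (some x) (f : Int) =
      (f : Int) + (((PySem.List.index? (x :: xs) (xs.foldl max x)).getD 0 : Nat) : Int) + 1 := by
  rw [pvLoopL_some]
  cases xs with
  | nil => simp [PySem.List.max?]
  | cons y ys =>
    have hfold : (y :: ys).foldl max x = max x (ys.foldl max y) := by
      simpa using pvFoldlMax ys x y
    have hMx : PySem.List.max? (y :: ys) (fun v => v) = some (ys.foldl max y) :=
      PySem.List.max?_id_cons y ys
    obtain ⟨k, hk⟩ : ∃ k, PySem.List.index? (y :: ys) (ys.foldl max y) = some k := by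
      rw [Option.isSome_iff_exists.symm, PySem.List.index?_isSome_iff]
      exact PySem.List.max?_mem hMx
    rw [hMx, hfold]
    simp only [Option.elim_some]
    by_cases hx : x < ys.foldl max y
    · rw [if_pos hx, max_eq_right (le_of_lt hx),
        PySem.List.index?_cons_of_ne _ (ne_of_lt hx), hk]
      simp only [Option.map_some, Option.getD_some]
      push_cast; ring
    · rw [if_neg hx, max_eq_left (not_lt.mp hx), PySem.List.index?_cons_self]
      simp

-- ===== VERDICT (by name: the statement is the Claim_ definition above) =====
theorem calcProdMaxIngresosSem_spec : Claim_equal_calcProdMaxIngresosSem := by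
  intro matVtas matPrecios _ hpre
  obtain ⟨hne, -⟩ := hpre
  obtain ⟨v, vs, rfl⟩ : ∃ v vs, matVtas = v :: vs := by
    cases matVtas with
    | nil => exact absurd rfl hne
    | cons v vs => exact ⟨v, vs, rfl⟩
  unfold Spec_calcProdMaxIngresosSem calcProdMaxIngresosSem calcProdMaxIngresosSem_alt
  have hlst :
      (PySem.List.pyRange 0 (((v :: vs).length : Nat) : Int) 1).map
        (fun f => (((PySem.List.pyGet? (v :: vs) f).getD []).sum) * ((PySem.List.pyGet? matPrecios f).getD 0))
      = pvRevs matPrecios (v :: vs) 0 := by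
    have := pvLst_eq_revs matPrecios (v :: vs) []
    simpa using this
  simp only [hlst]
  have hrev : pvRevs matPrecios (v :: vs) 0
      = (v.sum * ((PySem.List.pyGet? matPrecios ((0 : Nat) : Int)).getD 0)) :: pvRevs matPrecios vs 1 := rfl
  have hB : pvAltLoop matPrecios (v :: vs) 0 none (-1)
      = pvLoopL (pvRevs matPrecios vs 1) (0 + 1) (some (v.sum * ((PySem.List.pyGet? matPrecios ((0 : Nat) : Int)).getD 0))) ((0 : Nat) : Int) := by
    rw [pvAltLoop]
    exact pvAltLoop_eq_loopL matPrecios vs 1 _ _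
  rw [hB, pvStep, hrev, PySem.List.max?_id_cons]
  simp only [Option.getD_some]
  push_cast; ring
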